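-- pv_equiv track=rewrite | github.com/bsifflard77/specmap-mcp | src/specmap/plan.py | _extract_technical_constraints
-- ===== SOURCE A (Python) =====
-- from typing import Dict, List, Optional, Tuple
--
-- def _extract_technical_constraints(content: str) -> Dict:
--     """Extract technical constraints and requirements"""
--     constraints = {
--         'platform': '',
--         'performance': '',
--         'security': '',
--         'integration': '',
--         'scalability': ''
--     }
--
--     # Look for technical constraints section
--     lines = content.split('\n')
--     in_constraints = False
--
--     for line in lines:
--         if 'technical constraints' in line.lower() and '#' in line:
--             in_constraints = True
--             continue
--         elif in_constraints and line.strip().startswith('#') and 'technical constraints' not in line.lower():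
--             in_constraints = False
--
--         if in_constraints:
--             if '**platform**:' in line.lower():
--                 constraints['platform'] = line.split(':', 1)[1].strip()
--             elif '**performance**:' in line.lower():
--                 constraints['performance'] = line.split(':', 1)[1].strip()
--             elif '**security**:' in line.lower():
--                 constraints['security'] = line.split(':', 1)[1].strip()
--             elif '**integration**:' in line.lower():
--                 constraints['integration'] = line.split(':', 1)[1].strip()
--
--     return constraints
-- ===== SOURCE B (Python) =====
-- def _extract_technical_constraints(content: str):
--     """Two-pass: first collect the technical-constraints section lines, then parse fields."""
--     section = []
--     active = False
--     for line in content.split('\n'):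
--         low = line.lower()
--         if 'technical constraints' in low and '#' in line:
--             active = True
--         elif active and line.strip().startswith('#') and 'technical constraints' not in low:
--             active = False
--         elif active:
--             section.append(line)
--     result = dict.fromkeys(('platform', 'performance', 'security', 'integration', 'scalability'), '')
--     table = [('**platform**:', 'platform'), ('**performance**:', 'performance'),
--              ('**security**:', 'security'), ('**integration**:', 'integration')]
--     for line in section:
--         low = line.lower()
--         for marker, key in table:
--             if marker in low:
--                 result[key] = line.split(':', 1)[1].strip()
--                 break
--     return result
-- ===== Notes on version B (the rewrite author's own statement) =====
-- stated objective: alternative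
-- what changed: Single stateful loop interleaving section tracking and field parsing is split into two passes: first collect the technical-constraints section lines, then parse fields from them via a marker table with first-match-wins instead of an if/elif chain.
import Mathlib
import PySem

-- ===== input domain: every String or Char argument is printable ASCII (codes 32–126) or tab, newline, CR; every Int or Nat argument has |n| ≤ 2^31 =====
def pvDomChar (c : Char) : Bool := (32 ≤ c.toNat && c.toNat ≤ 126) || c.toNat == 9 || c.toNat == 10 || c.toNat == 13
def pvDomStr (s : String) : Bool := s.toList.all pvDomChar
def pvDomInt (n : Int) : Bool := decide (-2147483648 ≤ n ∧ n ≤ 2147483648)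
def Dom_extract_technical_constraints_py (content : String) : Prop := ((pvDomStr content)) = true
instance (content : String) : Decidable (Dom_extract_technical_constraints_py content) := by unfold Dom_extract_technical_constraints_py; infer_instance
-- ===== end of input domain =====

-- B is a two-pass decomposition (collect the section lines, then parse fields via a marker table);
-- objective: alternative/simpler decomposition, same cost. Equivalence of return values is proved.

-- ===== PORT A =====
-- 'technical constraints' in line.lower() and '#' in line
def pvIsHdr (line : String) : Bool :=
  PySem.Str.isIn "technical constraints" (PySem.Str.lower line) && PySem.Str.isIn "#" line
-- line.strip().startswith('#') and 'technical constraints' not in line.lower()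
def pvIsClose (line : String) : Bool :=
  PySem.Str.startswith (PySem.Str.strip line) "#"
    && !(PySem.Str.isIn "technical constraints" (PySem.Str.lower line))
-- line.split(':', 1)[1].strip(); the [1] access is only reached when ':' ∈ line, so getD's fallback is unreachable there
def pvFieldVal (line : String) : String :=
  PySem.Str.strip ((((PySem.Str.splitMax? line ":" 1).getD []).getD 1 ""))
-- A's if/elif chain over the four recognized fields
def pvChain (d : PySem.Dict String String) (line : String) : PySem.Dict String String :=
  if PySem.Str.isIn "**platform**:" (PySem.Str.lower line) then
    d.insert "platform" (pvFieldVal line)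
  else if PySem.Str.isIn "**performance**:" (PySem.Str.lower line) then
    d.insert "performance" (pvFieldVal line)
  else if PySem.Str.isIn "**security**:" (PySem.Str.lower line) then
    d.insert "security" (pvFieldVal line)
  else if PySem.Str.isIn "**integration**:" (PySem.Str.lower line) then
    d.insert "integration" (pvFieldVal line)
  else d

def pvInitTC : PySem.Dict String String :=
  PySem.Dict.ofList [("platform",""),("performance",""),("security",""),("integration",""),("scalability","")]

def pvStepA (st : PySem.Dict String String × Bool) (line : String) :
    PySem.Dict String String × Bool :=
  if pvIsHdr line then (st.1, true)            -- in_constraints = True; continue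
  else if st.2 && pvIsClose line then (st.1, false)
  else if st.2 then (pvChain st.1 line, true)
  else (st.1, false)

def extract_technical_constraints_py (content : String) : List (String × String) :=
  ((((PySem.Str.split? content "\n").getD []).foldl pvStepA (pvInitTC, false)).1).items

-- ===== PORT B =====
-- pass 1: collect the lines belonging to the technical-constraints section
def pvCollect (st : List String × Bool) (line : String) : List String × Bool :=
  if pvIsHdr line then (st.1, true)
  else if st.2 && pvIsClose line then (st.1, false)
  else if st.2 then (st.1 ++ [line], true)
  else (st.1, false)

def pvFieldTable : List (String × String) :=
  [("**platform**:","platform"),("**performance**:","performance"),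
   ("**security**:","security"),("**integration**:","integration")]

-- pass 2: first marker found in the table wins (the 'break')
def pvAssign (d : PySem.Dict String String) (line : String) : PySem.Dict String String :=
  match pvFieldTable.find? (fun p => PySem.Str.isIn p.1 (PySem.Str.lower line)) with
  | some p => d.insert p.2 (pvFieldVal line)
  | none => d

def pvInitAlt : PySem.Dict String String :=
  PySem.Dict.ofList [("platform",""),("performance",""),("security",""),("integration",""),("scalability","")]

def extract_technical_constraints_py_alt (content : String) : List (String × String) :=
  (((((PySem.Str.split? content "\n").getD []).foldl pvCollect ([], false)).1).foldl
    pvAssign pvInitAlt).items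

-- ===== PRECONDITION & SPEC =====
def Spec_extract_technical_constraints_py (content : String) (out : List (String × String)) : Prop := out = extract_technical_constraints_py_alt content
instance (content : String) (out : List (String × String)) : Decidable (Spec_extract_technical_constraints_py content out) := by unfold Spec_extract_technical_constraints_py; infer_instance

-- ===== CLAIM (what is proved, stated in full; the proofs are below) =====
def Claim_equal_extract_technical_constraints_py : Prop := ∀ (content : String), Dom_extract_technical_constraints_py content → Spec_extract_technical_constraints_py content (extract_technical_constraints_py content)

-- ===== LEMMAS AND PROOFS =====

theorem pvStepA_hdr (d : PySem.Dict String String) (b : Bool) (l : String)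
    (h : pvIsHdr l = true) : pvStepA (d, b) l = (d, true) := by
  simp [pvStepA, h]

theorem pvStepA_close (d : PySem.Dict String String) (l : String)
    (h : pvIsHdr l = false) (h2 : pvIsClose l = true) :
    pvStepA (d, true) l = (d, false) := by
  simp [pvStepA, h, h2]

theorem pvStepA_active (d : PySem.Dict String String) (l : String)
    (h : pvIsHdr l = false) (h2 : pvIsClose l = false) :
    pvStepA (d, true) l = (pvChain d l, true) := by
  simp [pvStepA, h, h2]

theorem pvStepA_off (d : PySem.Dict String String) (l : String)
    (h : pvIsHdr l = false) : pvStepA (d, false) l = (d, false) := by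
  simp [pvStepA, h]

theorem pvCollect_hdr (acc : List String) (b : Bool) (l : String)
    (h : pvIsHdr l = true) : pvCollect (acc, b) l = (acc, true) := by
  simp [pvCollect, h]

theorem pvCollect_close (acc : List String) (l : String)
    (h : pvIsHdr l = false) (h2 : pvIsClose l = true) :
    pvCollect (acc, true) l = (acc, false) := by
  simp [pvCollect, h, h2]

theorem pvCollect_active (acc : List String) (l : String)
    (h : pvIsHdr l = false) (h2 : pvIsClose l = false) :
    pvCollect (acc, true) l = (acc ++ [l], true) := by
  simp [pvCollect, h, h2]

theorem pvCollect_off (acc : List String) (l : String)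
    (h : pvIsHdr l = false) : pvCollect (acc, false) l = (acc, false) := by
  simp [pvCollect, h]

-- one collect step from any accumulator = the step from [] with the accumulator in front
theorem pvCollect_shift_step (acc : List String) (b : Bool) (l : String) :
    pvCollect (acc, b) l = (acc ++ (pvCollect ([], b) l).1, (pvCollect ([], b) l).2) := by
  unfold pvCollect; split_ifs <;> simp

theorem pvCollect_shift (ls : List String) (acc : List String) (b : Bool) :
    ls.foldl pvCollect (acc, b)
      = (acc ++ (ls.foldl pvCollect ([], b)).1, (ls.foldl pvCollect ([], b)).2) := by
  induction ls generalizing acc b with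
  | nil => simp
  | cons l ls ih =>
    simp only [List.foldl_cons]
    rw [pvCollect_shift_step acc b l]
    rw [ih (acc ++ (pvCollect ([], b) l).1) (pvCollect ([], b) l).2]
    rw [ih (pvCollect ([], b) l).1 (pvCollect ([], b) l).2]
    simp

-- A's elif chain on one active line is B's table lookup
theorem pvChain_eq_assign (d : PySem.Dict String String) (line : String) :
    pvChain d line = pvAssign d line := by
  unfold pvChain pvAssign pvFieldTable
  simp only [List.find?]
  split_ifs <;> simp_all

theorem pvMain (ls : List String) (d : PySem.Dict String String) (b : Bool) :
    (ls.foldl pvStepA (d, b)).1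
      = ((ls.foldl pvCollect ([], b)).1).foldl pvAssign d := by
  induction ls generalizing d b with
  | nil => simp
  | cons l ls ih =>
    simp only [List.foldl_cons]
    cases h1 : pvIsHdr l with
    | true =>
      rw [pvStepA_hdr d b l h1, pvCollect_hdr [] b l h1]
      exact ih d true
    | false =>
      cases b with
      | false =>
        rw [pvStepA_off d l h1, pvCollect_off [] l h1]
        exact ih d false
      | true =>
        cases h2 : pvIsClose l with
        | true =>
          rw [pvStepA_close d l h1 h2, pvCollect_close [] l h1 h2]
          exact ih d false
        | false =>
          rw [pvStepA_active d l h1 h2, pvCollect_active [] l h1 h2]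
          simp only [List.nil_append]
          rw [pvCollect_shift ls [l] true]
          simp only [List.foldl_append, List.foldl_cons, List.foldl_nil]
          rw [pvChain_eq_assign]
          exact ih (pvAssign d l) true

-- ===== VERDICT (by name: the statement is the Claim_ definition above) =====
theorem extract_technical_constraints_py_spec : Claim_equal_extract_technical_constraints_py := by
  intro content _
  unfold Spec_extract_technical_constraints_py
  unfold extract_technical_constraints_py extract_technical_constraints_py_alt
  rw [pvMain]
  rfl
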